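-- pv_equiv track=rewrite | github.com/GuiPFranco13/Trabalho-de-Seg | Cifras.py | cifra_deslocamento
-- ===== SOURCE A (Python) =====
-- def cifra_deslocamento(txt, desloca): #Para funcionar, deve se ceder também qual o deslocamento que será utilizado
--     resultado = ""
--
--     for char in txt:
--         if char.isalpha(): #Verifica se o caractere é uma letra
--             deslocamento_base = 65 if char.isupper() else 97 #Define a base de deslocamento para maiusculas e minusculas
--             resultado += chr((ord(char) - deslocamento_base + desloca) % 26 + deslocamento_base)
--         else:
--             resultado += char #Mantem caracteres não alfabeticos inalterados
--
--     return resultado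
-- ===== SOURCE B (Python) =====
-- def cifra_deslocamento(txt, desloca):
--     src = ""
--     dst = ""
--     for base in (65, 97):
--         for i in range(26):
--             src += chr(base + i)
--             dst += chr((i + desloca) % 26 + base)
--     return txt.translate(str.maketrans(src, dst))
-- ===== Notes on version B (the rewrite author's own statement) =====
-- stated objective: faster
-- what changed: B precomputes a 52-letter translation table over the fixed alphabet and applies it with str.translate in one branch-free pass, instead of branching on isalpha/isupper and doing mod arithmetic for every character of the text.
import Mathlib
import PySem

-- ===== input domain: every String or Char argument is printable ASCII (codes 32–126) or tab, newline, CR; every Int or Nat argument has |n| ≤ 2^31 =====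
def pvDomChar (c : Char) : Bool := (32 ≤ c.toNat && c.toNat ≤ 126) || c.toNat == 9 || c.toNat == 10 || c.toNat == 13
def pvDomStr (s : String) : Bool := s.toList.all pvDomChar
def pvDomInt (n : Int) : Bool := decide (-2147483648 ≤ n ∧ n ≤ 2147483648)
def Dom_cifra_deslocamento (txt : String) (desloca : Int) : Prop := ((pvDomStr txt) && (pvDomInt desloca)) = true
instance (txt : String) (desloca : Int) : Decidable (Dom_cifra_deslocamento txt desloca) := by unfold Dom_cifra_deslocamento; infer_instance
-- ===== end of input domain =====

-- B replaces A's per-character isalpha/isupper branching by a 52-letter translation table built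
-- once over the fixed alphabet and a single str.translate pass (objective: faster, measured).

-- ===== PORT A =====
-- chr(...) is ported as Char.ofNat: exact here, the argument is always a valid ASCII code
-- (base + r with 0 ≤ r < 26). isalpha/isupper are PySem's, exact on Dom's ASCII characters.
def cifra_deslocamento (txt : String) (desloca : Int) : String :=
  String.mk (txt.toList.foldl (fun resultado char =>
    if PySem.Chars.isalpha char then
      let deslocamento_base : Int := if PySem.Chars.isupper char then 65 else 97
      resultado ++ [Char.ofNat ((PySem.Int.mod ((char.toNat : Int) - deslocamento_base + desloca) 26 + deslocamento_base).toNat)]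
    else
      resultado ++ [char]) [])

-- ===== PORT B =====
-- str.maketrans(src, dst) builds a dict keyed by code point; built here exactly as Source B builds
-- src/dst: for base in (65, 97), for i in range(26), key base+i, value chr((i+desloca)%26+base).
def cifraTable (desloca : Int) : List (Nat × Char) :=
  ([65, 97] : List Nat).flatMap (fun base =>
    (List.range 26).map (fun i =>
      (base + i, Char.ofNat ((PySem.Int.mod ((i : Int) + desloca) 26 + (base : Int)).toNat))))

-- str.translate(table): each character is looked up by its code point; absent keys pass through.
def cifra_deslocamento_alt (txt : String) (desloca : Int) : String :=
  String.mk (txt.toList.map (fun c => ((cifraTable desloca).lookup c.toNat).getD c))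

-- ===== PRECONDITION & SPEC =====
def Spec_cifra_deslocamento (txt : String) (desloca : Int) (out : String) : Prop := out = cifra_deslocamento_alt txt desloca
instance (txt : String) (desloca : Int) (out : String) : Decidable (Spec_cifra_deslocamento txt desloca out) := by unfold Spec_cifra_deslocamento; infer_instance

-- ===== CLAIM (what is proved, stated in full; the proofs are below) =====
def Claim_equal_cifra_deslocamento : Prop := ∀ (txt : String) (desloca : Int), Dom_cifra_deslocamento txt desloca → Spec_cifra_deslocamento txt desloca (cifra_deslocamento txt desloca)

-- ===== LEMMAS AND PROOFS =====

-- A's per-character step, factored out for the proof (used by neither port).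
def aStep (desloca : Int) (char : Char) : Char :=
  if PySem.Chars.isalpha char then
    let deslocamento_base : Int := if PySem.Chars.isupper char then 65 else 97
    Char.ofNat ((PySem.Int.mod ((char.toNat : Int) - deslocamento_base + desloca) 26 + deslocamento_base).toNat)
  else char

lemma foldl_aStep (desloca : Int) (l : List Char) (acc : List Char) :
    l.foldl (fun resultado char =>
      if PySem.Chars.isalpha char then
        let deslocamento_base : Int := if PySem.Chars.isupper char then 65 else 97
        resultado ++ [Char.ofNat ((PySem.Int.mod ((char.toNat : Int) - deslocamento_base + desloca) 26 + deslocamento_base).toNat)]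
      else resultado ++ [char]) acc = acc ++ l.map (aStep desloca) := by
  induction l generalizing acc with
  | nil => simp
  | cons c l ih =>
    rw [List.foldl_cons, ih]
    unfold aStep
    split_ifs <;> simp_all

-- lookup in one 26-letter block of the table
lemma lookup_block (base : Nat) (f : Nat → Char) (m n : Nat) :
    ((List.range m).map (fun i => (base + i, f i))).lookup n
      = if base ≤ n ∧ n < base + m then some (f (n - base)) else none := by
  induction m with
  | zero => simp
  | succ m ih =>
    rw [List.range_succ, List.map_append, List.lookup_append, ih]
    by_cases h1 : base ≤ n ∧ n < base + m
    · rw [if_pos h1, if_pos (by omega)]; rfl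
    · rw [if_neg h1, Option.none_or]
      simp only [List.map_cons, List.map_nil, List.lookup_cons, List.lookup_nil]
      by_cases h2 : n = base + m
      · rw [if_pos (by omega)]
        have hb : (n == base + m) = true := by simp [h2]
        rw [hb]
        have hnb : n - base = m := by omega
        simp [hnb]
      · rw [if_neg (by omega)]
        have hb : (n == base + m) = false := by simp; omega
        rw [hb]

lemma charLe (k : Char) (c : Char) : (k ≤ c) ↔ k.toNat ≤ c.toNat := by
  rw [Char.le_def, UInt32.le_iff_toNat_le]; rfl

lemma lookup_cifraTable (desloca : Int) (n : Nat) :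
    (cifraTable desloca).lookup n
      = if 65 ≤ n ∧ n ≤ 90 then
          some (Char.ofNat ((PySem.Int.mod (((n : Int) - 65) + desloca) 26 + 65).toNat))
        else if 97 ≤ n ∧ n ≤ 122 then
          some (Char.ofNat ((PySem.Int.mod (((n : Int) - 97) + desloca) 26 + 97).toNat))
        else none := by
  unfold cifraTable
  simp only [List.flatMap_cons, List.flatMap_nil, List.append_nil, List.lookup_append]
  rw [lookup_block 65 _ 26 n, lookup_block 97 _ 26 n]
  by_cases h1 : 65 ≤ n ∧ n ≤ 90
  · rw [if_pos (by omega), if_pos h1]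
    simp only [Option.some_or]
    congr 2
    have : ((n - 65 : Nat) : Int) = (n : Int) - 65 := by omega
    rw [this]; norm_num
  · rw [if_neg (by omega), Option.none_or, if_neg h1]
    by_cases h2 : 97 ≤ n ∧ n ≤ 122
    · rw [if_pos (by omega), if_pos h2]
      congr 2
      have : ((n - 97 : Nat) : Int) = (n : Int) - 97 := by omega
      rw [this]; norm_num
    · rw [if_neg (by omega), if_neg h2]

-- per-character agreement (for every character: the ported isalpha is the ASCII-letter
-- test and the table covers exactly those 52 codes, so no domain hypothesis is needed)
lemma step_eq (desloca : Int) (c : Char) :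
    (((cifraTable desloca).lookup c.toNat).getD c) = aStep desloca c := by
  rw [lookup_cifraTable]
  unfold aStep
  simp only [PySem.Chars.isalpha, PySem.Chars.isupper, PySem.Chars.islower, charLe]
  by_cases h1 : 65 ≤ c.toNat ∧ c.toNat ≤ 90
  · rw [if_pos h1]
    have ha : ((decide ('A'.toNat ≤ c.toNat) && decide (c.toNat ≤ 'Z'.toNat) ||
        (decide ('a'.toNat ≤ c.toNat) && decide (c.toNat ≤ 'z'.toNat)))) = true := by
      simp; omega
    rw [ha, if_pos rfl]
    have hu : ((decide ('A'.toNat ≤ c.toNat) && decide (c.toNat ≤ 'Z'.toNat))) = true := by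
      simp; omega
    rw [hu, if_pos rfl]
    rfl
  · rw [if_neg h1]
    by_cases h2 : 97 ≤ c.toNat ∧ c.toNat ≤ 122
    · rw [if_pos h2]
      have ha : ((decide ('A'.toNat ≤ c.toNat) && decide (c.toNat ≤ 'Z'.toNat) ||
          (decide ('a'.toNat ≤ c.toNat) && decide (c.toNat ≤ 'z'.toNat)))) = true := by
        simp; omega
      rw [ha, if_pos rfl]
      have hu : ((decide ('A'.toNat ≤ c.toNat) && decide (c.toNat ≤ 'Z'.toNat))) = false := by
        simp; omega
      rw [hu, if_neg (by simp)]
      rfl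
    · rw [if_neg h2]
      have ha : ((decide ('A'.toNat ≤ c.toNat) && decide (c.toNat ≤ 'Z'.toNat) ||
          (decide ('a'.toNat ≤ c.toNat) && decide (c.toNat ≤ 'z'.toNat)))) = false := by
        simp; omega
      rw [ha, if_neg (by simp)]
      rfl

-- ===== VERDICT (by name: the statement is the Claim_ definition above) =====
theorem cifra_deslocamento_spec : Claim_equal_cifra_deslocamento := by
  intro txt desloca _
  unfold Spec_cifra_deslocamento cifra_deslocamento cifra_deslocamento_alt
  rw [foldl_aStep]
  simp [step_eq]
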